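-- pv_equiv track=rewrite | github.com/GanchimegNamuunbayar/methscope | app/main.py | _resolve_gene_name
-- ===== SOURCE A (Python) =====
-- def _resolve_gene_name(gene_list: list[str], query: str) -> str:
--     """Resolve user query to canonical gene_id (same logic as get_gene_methylation_from_cached)."""
--     q = query.strip()
--     if not q:
--         raise KeyError("gene_id is required")
--     # Exact
--     if q in gene_list:
--         return q
--     for k in gene_list:
--         if k == q or k.replace("gene-", "") == q or k.endswith("_" + q):
--             return k
--     # Case-insensitive substring
--     lower = q.lower()
--     for k in gene_list:
--         if lower in k.lower() or k.replace("gene-", "").lower() == lower: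
--             return k
--     raise KeyError(f"Gene not found: {query}")
-- ===== SOURCE B (Python) =====
-- def _tier(q, lower, k):
--     """Lowest matching tier of candidate k for query q (lower = q.lower()); 3 = no match."""
--     if k == q:
--         return 0
--     if k.replace("gene-", "") == q or k.endswith("_" + q):
--         return 1
--     if lower in k.lower() or k.replace("gene-", "").lower() == lower:
--         return 2
--     return 3
--
--
-- def _resolve_gene_name(gene_list: list[str], query: str) -> str:
--     q = query.strip()
--     if not q:
--         raise KeyError("gene_id is required")
--     lower = q.lower()
--     best_tier, best = 3, None
--     for k in gene_list:
--         tier = _tier(q, lower, k)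
--         if tier < best_tier:
--             best_tier, best = tier, k
--     if best is None:
--         raise KeyError(f"Gene not found: {query}")
--     return best
-- ===== Notes on version B (the rewrite author's own statement) =====
-- stated objective: alternative
-- what changed: A's three sequential scans (exact membership, exact-ish loop, case-insensitive loop) are replaced by a single pass that computes each candidate's match tier and keeps the first candidate with the strictly lowest tier.
import Mathlib
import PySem

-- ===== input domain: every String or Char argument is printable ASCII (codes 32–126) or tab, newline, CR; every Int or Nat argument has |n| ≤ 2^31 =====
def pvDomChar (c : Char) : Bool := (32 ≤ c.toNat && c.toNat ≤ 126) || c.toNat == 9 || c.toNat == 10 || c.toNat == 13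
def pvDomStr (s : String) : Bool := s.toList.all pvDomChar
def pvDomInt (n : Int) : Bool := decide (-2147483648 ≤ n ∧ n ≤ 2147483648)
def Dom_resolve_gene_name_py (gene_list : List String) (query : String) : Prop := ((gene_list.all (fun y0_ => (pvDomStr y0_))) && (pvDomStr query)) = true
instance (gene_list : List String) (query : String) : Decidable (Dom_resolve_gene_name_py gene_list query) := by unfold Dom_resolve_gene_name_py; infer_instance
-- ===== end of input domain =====

-- B replaces A's three sequential scans by one pass keeping the first candidate of lowest match tier (alternative decomposition, same cost).
-- Pre_ excludes exactly the inputs where A raises KeyError (blank query, or no candidate matches any rule).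


-- ===== PORT A =====
-- literal transliteration of Source A: membership test, then the exact-ish loop, then the case-insensitive loop
def resolve_gene_name_py (gene_list : List String) (query : String) : String :=
  let q := PySem.Str.strip query
  if PySem.Str.len q = 0 then ""     -- Python: raise KeyError("gene_id is required"); excluded by Pre_
  else if gene_list.contains q then q
  else
    match gene_list.find? (fun k =>
        k == q || PySem.Str.replace k "gene-" "" == q || PySem.Str.endswith k ("_" ++ q)) with
    | some k => k
    | none =>
      let lower := PySem.Str.lower q
      match gene_list.find? (fun k =>
          PySem.Str.isIn lower (PySem.Str.lower k) || PySem.Str.lower (PySem.Str.replace k "gene-" "") == lower) with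
      | some k => k
      | none => ""                   -- Python: raise KeyError(f"Gene not found: {query}"); excluded by Pre_

-- ===== PORT B =====
-- transliteration of Source B's helper _tier
def pvTier (q lower k : String) : Nat :=
  if k == q then 0
  else if PySem.Str.replace k "gene-" "" == q || PySem.Str.endswith k ("_" ++ q) then 1
  else if PySem.Str.isIn lower (PySem.Str.lower k) || PySem.Str.lower (PySem.Str.replace k "gene-" "") == lower then 2
  else 3

-- one iteration of Source B's loop: keep the state unless a strictly lower tier is seen
def pvStep (q lower : String) (st : Nat × Option String) (k : String) : Nat × Option String :=
  let tier := pvTier q lower k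
  if tier < st.1 then (tier, some k) else st

def resolve_gene_name_py_alt (gene_list : List String) (query : String) : String :=
  let q := PySem.Str.strip query
  if PySem.Str.len q = 0 then ""     -- Python: raise KeyError; excluded by Pre_
  else
    let lower := PySem.Str.lower q
    match (gene_list.foldl (pvStep q lower) (3, none)).2 with
    | some k => k
    | none => ""                     -- Python: raise KeyError; excluded by Pre_

-- ===== PRECONDITION & SPEC =====
-- Pre_ excludes exactly the inputs on which A raises KeyError: a query blank after strip, or a list with no candidate matching any of A's rules.
def Pre_resolve_gene_name_py (gene_list : List String) (query : String) : Prop :=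
  PySem.Str.len (PySem.Str.strip query) ≠ 0 ∧
  ∃ k ∈ gene_list,
    k = PySem.Str.strip query ∨
    PySem.Str.replace k "gene-" "" = PySem.Str.strip query ∨
    PySem.Str.endswith k ("_" ++ PySem.Str.strip query) = true ∨
    PySem.Str.isIn (PySem.Str.lower (PySem.Str.strip query)) (PySem.Str.lower k) = true ∨
    PySem.Str.lower (PySem.Str.replace k "gene-" "") = PySem.Str.lower (PySem.Str.strip query)
instance (gene_list : List String) (query : String) : Decidable (Pre_resolve_gene_name_py gene_list query) := by unfold Pre_resolve_gene_name_py; infer_instance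

def pvWitness_resolve_gene_name_py : List String × String := (["abc"], "abc")

def Spec_resolve_gene_name_py (gene_list : List String) (query : String) (out : String) : Prop := out = resolve_gene_name_py_alt gene_list query
instance (gene_list : List String) (query : String) (out : String) : Decidable (Spec_resolve_gene_name_py gene_list query out) := by unfold Spec_resolve_gene_name_py; infer_instance

-- ===== CLAIM (what is proved, stated in full; the proofs are below) =====
def Claim_equal_resolve_gene_name_py : Prop := ∀ (gene_list : List String) (query : String), Dom_resolve_gene_name_py gene_list query → Pre_resolve_gene_name_py gene_list query → Spec_resolve_gene_name_py gene_list query (resolve_gene_name_py gene_list query)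

-- ===== LEMMAS AND PROOFS =====

-- the two "exact-ish" loop conditions, named for the proofs
def pvCond01 (q k : String) : Bool :=
  k == q || PySem.Str.replace k "gene-" "" == q || PySem.Str.endswith k ("_" ++ q)

def pvCond2 (lw k : String) : Bool :=
  PySem.Str.isIn lw (PySem.Str.lower k) || PySem.Str.lower (PySem.Str.replace k "gene-" "") == lw

theorem pvTier_eq_zero_iff (q lw k : String) : pvTier q lw k = 0 ↔ k = q := by
  unfold pvTier; split_ifs <;> simp_all

theorem pvCond01_iff (q lw k : String) : pvCond01 q k = true ↔ pvTier q lw k ≤ 1 := by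
  unfold pvCond01 pvTier; split_ifs <;> simp_all

theorem pvCond2_iff (q lw k : String) (h : pvCond01 q k = false) :
    pvCond2 lw k = true ↔ pvTier q lw k = 2 := by
  unfold pvCond01 at h; unfold pvCond2 pvTier; split_ifs <;> simp_all

theorem pvTier_le_two_iff (q lw k : String) :
    pvTier q lw k ≤ 2 ↔ (k = q ∨
      PySem.Str.replace k "gene-" "" = q ∨
      PySem.Str.endswith k ("_" ++ q) = true ∨
      PySem.Str.isIn lw (PySem.Str.lower k) = true ∨
      PySem.Str.lower (PySem.Str.replace k "gene-" "") = lw) := by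
  unfold pvTier; split_ifs <;> simp_all
  all_goals tauto

theorem pvFind?_congr {α : Type} (l : List α) (p p' : α → Bool) (h : ∀ k ∈ l, p k = p' k) :
    l.find? p = l.find? p' := by
  induction l with
  | nil => rfl
  | cons a t ih =>
    simp only [List.find?_cons, h a (by simp)]
    cases p' a <;> simp [ih (fun k hk => h k (by simp [hk]))]

theorem pvFold_no_update (q lw : String) (l : List String) :
    ∀ (bt : Nat) (b : Option String), (∀ k ∈ l, bt ≤ pvTier q lw k) →
    l.foldl (pvStep q lw) (bt, b) = (bt, b) := by
  induction l with
  | nil => intro bt b _; rfl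
  | cons a t ih =>
    intro bt b h
    have ha : ¬ pvTier q lw a < bt := by have := h a (by simp); omega
    simp only [List.foldl_cons, pvStep, if_neg ha]
    exact ih bt b (fun k hk => h k (by simp [hk]))

theorem pvFold_min (q lw : String) (l : List String) :
    ∀ (bt : Nat) (b : Option String) (m : Nat) (k0 : String), m < bt →
    (∀ k ∈ l, m ≤ pvTier q lw k) →
    l.find? (fun k => pvTier q lw k == m) = some k0 →
    l.foldl (pvStep q lw) (bt, b) = (m, some k0) := by
  induction l with
  | nil => intro _ _ _ _ _ _ h; simp at h
  | cons a t ih =>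
    intro bt b m k0 hmb hlb hfind
    by_cases ha : pvTier q lw a = m
    · rw [List.find?_cons_of_pos (by simp [ha])] at hfind
      injection hfind with hk0; subst hk0
      simp only [List.foldl_cons, pvStep, ha, if_pos hmb]
      exact pvFold_no_update q lw t m (some a) (fun k hk => hlb k (by simp [hk]))
    · rw [List.find?_cons_of_neg (by simp [ha])] at hfind
      have ham : m < pvTier q lw a := by have := hlb a (by simp); omega
      have hrest : ∀ k ∈ t, m ≤ pvTier q lw k := fun k hk => hlb k (by simp [hk])
      by_cases hup : pvTier q lw a < bt
      · simp only [List.foldl_cons, pvStep, if_pos hup]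
        exact ih (pvTier q lw a) (some a) m k0 ham hrest hfind
      · simp only [List.foldl_cons, pvStep, if_neg hup]
        exact ih bt b m k0 hmb hrest hfind

-- ===== VERDICT (by name: the statement is the Claim_ definition above) =====
theorem resolve_gene_name_py_spec : Claim_equal_resolve_gene_name_py := by
  intro gene_list query hdom hpre
  unfold Spec_resolve_gene_name_py resolve_gene_name_py resolve_gene_name_py_alt
  obtain ⟨hq, k0, hk0mem, hm⟩ := hpre
  set q := PySem.Str.strip query with hqdef
  simp only [if_neg hq]
  have hk0t : pvTier q (PySem.Str.lower q) k0 ≤ 2 :=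
    (pvTier_le_two_iff q (PySem.Str.lower q) k0).mpr hm
  by_cases hcon : gene_list.contains q
  · rw [if_pos hcon]
    have hqmem : q ∈ gene_list := List.contains_iff_mem.mp hcon
    have hfs : (gene_list.find? (fun k => pvTier q (PySem.Str.lower q) k == 0)).isSome := by
      rw [List.find?_isSome]
      exact ⟨q, hqmem, by simp [(pvTier_eq_zero_iff q (PySem.Str.lower q) q).mpr rfl]⟩
    obtain ⟨k1, hk1⟩ := Option.isSome_iff_exists.mp hfs
    have hk1q : k1 = q :=
      (pvTier_eq_zero_iff q (PySem.Str.lower q) k1).mp (by simpa using List.find?_some hk1)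
    rw [pvFold_min q (PySem.Str.lower q) gene_list 3 none 0 k1 (by omega)
        (fun k _ => Nat.zero_le _) hk1]
    simp [hk1q]
  · rw [if_neg hcon]
    have hge1 : ∀ k ∈ gene_list, 1 ≤ pvTier q (PySem.Str.lower q) k := by
      intro k hk
      by_cases hkq : k = q
      · exact absurd (List.contains_iff_mem.mpr (hkq ▸ hk)) hcon
      · have := (pvTier_eq_zero_iff q (PySem.Str.lower q) k).not.mpr hkq
        omega
    cases hfind1 : gene_list.find?
        (fun k => k == q || PySem.Str.replace k "gene-" "" == q ||
          PySem.Str.endswith k ("_" ++ q)) with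
    | some k1 =>
      have hfind1' : gene_list.find? (fun k => pvCond01 q k) = some k1 := hfind1
      have ht1 : pvTier q (PySem.Str.lower q) k1 = 1 := by
        have h1 := (pvCond01_iff q (PySem.Str.lower q) k1).mp (List.find?_some hfind1')
        have h2 := hge1 k1 (List.mem_of_find?_eq_some hfind1')
        omega
      have hswap : gene_list.find? (fun k => pvCond01 q k) =
          gene_list.find? (fun k => pvTier q (PySem.Str.lower q) k == 1) := by
        apply pvFind?_congr
        intro k hk
        have h1 := hge1 k hk
        rw [Bool.eq_iff_iff]
        constructor
        · intro hc; have := (pvCond01_iff q (PySem.Str.lower q) k).mp hc; simp; omega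
        · intro hc; apply (pvCond01_iff q (PySem.Str.lower q) k).mpr; simp at hc; omega
      rw [pvFold_min q (PySem.Str.lower q) gene_list 3 none 1 k1 (by omega) hge1
          (hswap ▸ hfind1')]
    | none =>
      have hfind1' : gene_list.find? (fun k => pvCond01 q k) = none := hfind1
      have hnc01 : ∀ k ∈ gene_list, pvCond01 q k = false := by
        intro k hk
        simpa using List.find?_eq_none.mp hfind1' k hk
      have hge2 : ∀ k ∈ gene_list, 2 ≤ pvTier q (PySem.Str.lower q) k := by
        intro k hk
        have h1 := (pvCond01_iff q (PySem.Str.lower q) k).not.mp (by simp [hnc01 k hk])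
        omega
      cases hfind2 : gene_list.find?
          (fun k => PySem.Str.isIn (PySem.Str.lower q) (PySem.Str.lower k) ||
            PySem.Str.lower (PySem.Str.replace k "gene-" "") == PySem.Str.lower q) with
      | some k2 =>
        have hfind2' : gene_list.find? (fun k => pvCond2 (PySem.Str.lower q) k) = some k2 :=
          hfind2
        have hmem2 := List.mem_of_find?_eq_some hfind2'
        have ht2 : pvTier q (PySem.Str.lower q) k2 = 2 :=
          (pvCond2_iff q (PySem.Str.lower q) k2 (hnc01 k2 hmem2)).mp (List.find?_some hfind2')
        have hswap : gene_list.find? (fun k => pvCond2 (PySem.Str.lower q) k) =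
            gene_list.find? (fun k => pvTier q (PySem.Str.lower q) k == 2) := by
          apply pvFind?_congr
          intro k hk
          rw [Bool.eq_iff_iff]
          simp only [pvCond2_iff q (PySem.Str.lower q) k (hnc01 k hk), beq_iff_eq]
        rw [pvFold_min q (PySem.Str.lower q) gene_list 3 none 2 k2 (by omega) hge2
            (hswap ▸ hfind2')]
      | none =>
        exfalso
        have hfind2' : gene_list.find? (fun k => pvCond2 (PySem.Str.lower q) k) = none := hfind2
        have h2 := hge2 k0 hk0mem
        have ht2 : pvTier q (PySem.Str.lower q) k0 = 2 := by omega
        have hc2 : pvCond2 (PySem.Str.lower q) k0 = true :=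
          (pvCond2_iff q (PySem.Str.lower q) k0 (hnc01 k0 hk0mem)).mpr ht2
        exact (List.find?_eq_none.mp hfind2' k0 hk0mem) hc2
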